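-- pv_equiv track=rewrite | github.com/HyungJunGoo/AlgorithmProblems | Baekjun/DP/1727.py | solution
-- ===== SOURCE A (Python) =====
-- def solution(n, m, male, female):
--     dp = [[0 for _ in range(m + 1)] for _ in range(n + 1)]
--
--     male, female = sorted(male), sorted(female)
--
--     for i in range(1, n + 1):
--         for j in range(1, m + 1):
--             dp[i][j] = dp[i - 1][j - 1] + abs(male[i - 1] - female[j - 1])
--             if i < j:
--                 dp[i][j] = min(dp[i][j], dp[i][j - 1])
--             if i > j:
--                 dp[i][j] = min(dp[i][j], dp[i - 1][j])
--     return dp[n][m]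
-- ===== SOURCE B (Python) =====
-- def solution(n, m, male, female):
--     ms, fs = sorted(male), sorted(female)
--     memo = {}
--     memo_get = memo.get
--
--     def f(i, j):
--         # min cost of pairing the first i sorted males with the first j sorted females
--         if i == 0 or j == 0:
--             return 0
--         cached = memo_get((i, j))
--         if cached is not None:
--             return cached
--         best = f(i - 1, j - 1) + abs(ms[i - 1] - fs[j - 1])
--         if i < j:
--             best = min(best, f(i, j - 1))
--         if i > j:
--             best = min(best, f(i - 1, j))
--         memo[(i, j)] = best
--         return best
--
--     return f(n, m)
-- ===== Notes on version B (the rewrite author's own statement) =====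
-- stated objective: alternative
-- what changed: Replaced A's iterative bottom-up fill of a full (n+1)x(m+1) table with a top-down memoized recursion f(i,j) over the subproblems actually needed, caching results in a dict and returning f(n,m).
import Mathlib
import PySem

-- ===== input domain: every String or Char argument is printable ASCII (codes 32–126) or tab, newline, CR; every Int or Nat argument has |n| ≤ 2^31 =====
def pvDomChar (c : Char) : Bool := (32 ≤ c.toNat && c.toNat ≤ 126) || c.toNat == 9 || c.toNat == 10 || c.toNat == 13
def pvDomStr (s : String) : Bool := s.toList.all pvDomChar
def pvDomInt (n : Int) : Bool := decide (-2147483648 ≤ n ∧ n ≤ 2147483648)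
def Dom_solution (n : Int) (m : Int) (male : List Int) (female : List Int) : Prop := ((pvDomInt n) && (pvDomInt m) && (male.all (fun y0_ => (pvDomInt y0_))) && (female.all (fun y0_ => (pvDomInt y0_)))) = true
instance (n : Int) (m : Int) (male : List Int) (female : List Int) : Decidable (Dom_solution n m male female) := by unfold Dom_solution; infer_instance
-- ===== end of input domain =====

-- B replaces A's bottom-up fill of a full (n+1)x(m+1) table by a top-down memoized recursion
-- over the subproblems actually reached (objective: alternative).

-- ===== PORT A =====
-- the value assigned to dp[i][j] by A's inner-loop body (Python's three in-place writes
-- dp[i][j] = …; if i<j: …; if i>j: … computed as one value, then written once)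
def pvVal (ms fs : List Int) (dp : List (List Int)) (i j : Int) : Int :=
  let v : Int := PySem.List.pyGetD (PySem.List.pyGetD dp (i-1) []) (j-1) 0 +
                 |PySem.List.pyGetD ms (i-1) 0 - PySem.List.pyGetD fs (j-1) 0|
  let v := if i < j then min v (PySem.List.pyGetD (PySem.List.pyGetD dp i []) (j-1) 0) else v
  if i > j then min v (PySem.List.pyGetD (PySem.List.pyGetD dp (i-1) []) j 0) else v

-- one iteration of A's inner loop: write dp[i][j]
def pvCell (ms fs : List Int) (dp : List (List Int)) (i j : Int) : List (List Int) :=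
  PySem.List.pySetD dp i (PySem.List.pySetD (PySem.List.pyGetD dp i []) j (pvVal ms fs dp i j))

-- A's inner loop: for j in range(1, m+1)
def pvRow (ms fs : List Int) (m : Int) (dp : List (List Int)) (i : Int) : List (List Int) :=
  (PySem.List.pyRange 1 (m+1) 1).foldl (fun dp j => pvCell ms fs dp i j) dp

def solution (n : Int) (m : Int) (male : List Int) (female : List Int) : Int :=
  let dp0 : List (List Int) :=
    (PySem.List.pyRange 0 (n+1) 1).map (fun _ => (PySem.List.pyRange 0 (m+1) 1).map (fun _ => (0:Int)))
  let ms := PySem.List.sorted male (fun x => x) false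
  let fs := PySem.List.sorted female (fun x => x) false
  let dp := (PySem.List.pyRange 1 (n+1) 1).foldl (pvRow ms fs m) dp0
  PySem.List.pyGetD (PySem.List.pyGetD dp n []) m 0

-- ===== PORT B =====
-- B's inner function f(i, j), with the memo dict threaded through (Python mutates one dict;
-- the port passes it in and returns the updated dict with the value). The recursion is over
-- Nat arguments so the i == 0 / j == 0 base cases are the two zero patterns.
def pvF (ms fs : List Int) : Nat → Nat → PySem.Dict (Int × Int) Int → Int × PySem.Dict (Int × Int) Int
  | 0, _, memo => (0, memo)
  | _+1, 0, memo => (0, memo)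
  | i+1, j+1, memo =>
    match PySem.Dict.get? memo (((i+1 : Nat) : Int), ((j+1 : Nat) : Int)) with
    | some v => (v, memo)
    | none =>
      let r1 := pvF ms fs i j memo
      let best := r1.1 + |PySem.List.pyGetD ms ((i : Nat) : Int) 0 - PySem.List.pyGetD fs ((j : Nat) : Int) 0|
      let r2 := if i + 1 < j + 1 then
          let r := pvF ms fs (i+1) j r1.2
          (min best r.1, r.2)
        else (best, r1.2)
      let r3 := if i + 1 > j + 1 then
          let r := pvF ms fs i (j+1) r2.2
          (min r2.1 r.1, r.2)
        else r2
      (r3.1, PySem.Dict.insert r3.2 (((i+1 : Nat) : Int), ((j+1 : Nat) : Int)) r3.1)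
termination_by i j _ => i + j

-- Python calls f(n, m) on ints; the recursion above is over Nat, so the entry converts
-- (negative n or m makes Python B recurse forever / raise, and is outside Pre_solution)
def solution_alt (n : Int) (m : Int) (male : List Int) (female : List Int) : Int :=
  let ms := PySem.List.sorted male (fun x => x) false
  let fs := PySem.List.sorted female (fun x => x) false
  (pvF ms fs n.toNat m.toNat PySem.Dict.empty).1

-- ===== PRECONDITION & SPEC =====
-- Pre_ is exactly the set of inputs on which Python A returns: negative n or m makes dp[n][m]
-- an IndexError, and when both n ≥ 1 and m ≥ 1 the loops index male/female up to n-1 / m-1.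
def Pre_solution (n : Int) (m : Int) (male : List Int) (female : List Int) : Prop :=
  0 ≤ n ∧ 0 ≤ m ∧ (n = 0 ∨ m = 0 ∨ (n ≤ male.length ∧ m ≤ female.length))
instance (n : Int) (m : Int) (male : List Int) (female : List Int) : Decidable (Pre_solution n m male female) := by unfold Pre_solution; infer_instance
def pvWitness_solution : Int × Int × List Int × List Int := (2, 2, [1, 5], [3, 0])

def Spec_solution (n : Int) (m : Int) (male : List Int) (female : List Int) (out : Int) : Prop := out = solution_alt n m male female
instance (n : Int) (m : Int) (male : List Int) (female : List Int) (out : Int) : Decidable (Spec_solution n m male female out) := by unfold Spec_solution; infer_instance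

-- ===== CLAIM (what is proved, stated in full; the proofs are below) =====
def Claim_equal_solution : Prop := ∀ (n : Int) (m : Int) (male : List Int) (female : List Int), Dom_solution n m male female → Pre_solution n m male female → Spec_solution n m male female (solution n m male female)

-- ===== LEMMAS AND PROOFS =====

-- the recurrence both programs compute, as a pure recursive function (proof-side only)
def pvMemo (ms fs : List Int) : Nat → Nat → Int
  | 0, _ => 0
  | _+1, 0 => 0
  | i+1, j+1 =>
    let best := pvMemo ms fs i j + |ms.getD i 0 - fs.getD j 0|
    let best := if i+1 < j+1 then min best (pvMemo ms fs (i+1) j) else best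
    if i+1 > j+1 then min best (pvMemo ms fs i (j+1)) else best
termination_by i j => i + j

-- the table A maintains, in closed form: entry (k,c) holds f(k,c) once computed
-- (rows below i, plus the first j columns of row i), and its initial 0 otherwise
def pvDP (ms fs : List Int) (M N i j : Nat) : List (List Int) :=
  (List.range (N+1)).map (fun k => (List.range (M+1)).map (fun c =>
    if k < i ∨ (k = i ∧ c ≤ j) then pvMemo ms fs k c else 0))

theorem pvMemo_zero_left (ms fs : List Int) (c : Nat) : pvMemo ms fs 0 c = 0 := by
  cases c <;> simp [pvMemo]

theorem pvMemo_zero_right (ms fs : List Int) (k : Nat) : pvMemo ms fs k 0 = 0 := by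
  cases k <;> simp [pvMemo]

theorem pvDP_getD (ms fs : List Int) (M N i j k : Nat) (hk : k < N + 1) :
    (pvDP ms fs M N i j).getD k [] =
      (List.range (M+1)).map (fun c => if k < i ∨ (k = i ∧ c ≤ j) then pvMemo ms fs k c else 0) := by
  simp [pvDP, List.getD, hk]

theorem pvRowEntry_getD (ms fs : List Int) (M i j k c : Nat) (hc : c < M + 1) :
    ((List.range (M+1)).map (fun c => if k < i ∨ (k = i ∧ c ≤ j) then pvMemo ms fs k c else 0)).getD c 0 =
      (if k < i ∨ (k = i ∧ c ≤ j) then pvMemo ms fs k c else 0) := by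
  simp [List.getD, hc]

-- the inner-loop body computes exactly f(i+1, j+1) on the partially filled table
theorem pvVal_eq (ms fs : List Int) (M N i j : Nat) (hi : i < N) (hj : j < M) :
    pvVal ms fs (pvDP ms fs M N (i+1) j) ((i+1 : Nat) : Int) ((j+1 : Nat) : Int) =
      pvMemo ms fs (i+1) (j+1) := by
  have e1 : ((i+1 : Nat) : Int) - 1 = ((i : Nat) : Int) := by push_cast; ring
  have e2 : ((j+1 : Nat) : Int) - 1 = ((j : Nat) : Int) := by push_cast; ring
  rw [pvVal]
  simp only [e1, e2, PySem.List.pyGetD_natCast]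
  rw [pvDP_getD ms fs M N (i+1) j i (by omega),
      pvDP_getD ms fs M N (i+1) j (i+1) (by omega),
      pvRowEntry_getD ms fs M (i+1) j i j (by omega),
      pvRowEntry_getD ms fs M (i+1) j (i+1) j (by omega),
      pvRowEntry_getD ms fs M (i+1) j i (j+1) (by omega)]
  have c1 : (i < i + 1 ∨ (i = i + 1 ∧ j ≤ j)) := by omega
  have c2 : (i < i + 1 ∨ (i = i + 1 ∧ j + 1 ≤ j)) := by omega
  simp only [if_pos c1, if_pos c2]
  rcases Nat.lt_trichotomy i j with h | h | h
  · simp [pvMemo, h, (show ¬ j < i by omega), (show i + 1 < j + 1 by omega),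
          (show ¬ (j + 1 < i + 1) by omega)]
  · subst h
    simp [pvMemo]
  · simp [pvMemo, h, (show ¬ i < j by omega), (show ¬ (i + 1 < j + 1) by omega),
          (show j + 1 < i + 1 by omega)]

-- writing that value extends the computed region by one cell (row level, then table level)
theorem pvSetRow (ms fs : List Int) (M i j : Nat) :
    ((List.range (M+1)).map (fun c => if i + 1 < i + 1 ∨ (i + 1 = i + 1 ∧ c ≤ j) then pvMemo ms fs (i+1) c else 0)).set (j+1) (pvMemo ms fs (i+1) (j+1)) =
      (List.range (M+1)).map (fun c => if i + 1 < i + 1 ∨ (i + 1 = i + 1 ∧ c ≤ j + 1) then pvMemo ms fs (i+1) c else 0) := by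
  apply List.ext_getElem
  · simp
  · intro c hc1 hc2
    simp only [List.length_set, List.length_map, List.length_range] at hc1 hc2
    rw [List.getElem_set]
    by_cases hc : j + 1 = c
    · subst hc
      rw [if_pos rfl, List.getElem_map, List.getElem_range, if_pos (by omega)]
    · rw [if_neg hc]
      by_cases hcj : c ≤ j
      · simp [hcj, (show c ≤ j + 1 by omega)]
      · simp [hcj, (show ¬ c ≤ j + 1 by omega)]

theorem pvDP_write (ms fs : List Int) (M N i j : Nat) (hi : i < N) :
    PySem.List.pySetD (pvDP ms fs M N (i+1) j) ((i+1 : Nat) : Int)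
        (PySem.List.pySetD ((pvDP ms fs M N (i+1) j).getD (i+1) []) ((j+1 : Nat) : Int)
          (pvMemo ms fs (i+1) (j+1))) =
      pvDP ms fs M N (i+1) (j+1) := by
  simp only [PySem.List.pySetD_natCast]
  rw [pvDP_getD ms fs M N (i+1) j (i+1) (by omega), pvSetRow ms fs M i j]
  apply List.ext_getElem
  · simp [pvDP]
  · intro k hk1 hk2
    simp only [pvDP, List.length_set, List.length_map, List.length_range] at hk1 hk2
    rw [List.getElem_set]
    by_cases hki : i + 1 = k
    · subst hki
      rw [if_pos rfl]
      simp only [pvDP, List.getElem_map, List.getElem_range]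
    · rw [if_neg hki]
      simp only [pvDP, List.getElem_map, List.getElem_range]
      apply List.map_congr_left
      intro c _
      have h : (k < i + 1 ∨ (k = i + 1 ∧ c ≤ j)) ↔ (k < i + 1 ∨ (k = i + 1 ∧ c ≤ j + 1)) := by
        omega
      exact if_congr h rfl rfl

theorem pvCell_step (ms fs : List Int) (M N i j : Nat) (hi : i < N) (hj : j < M) :
    pvCell ms fs (pvDP ms fs M N (i+1) j) ((i+1 : Nat) : Int) ((j+1 : Nat) : Int) =
      pvDP ms fs M N (i+1) (j+1) := by
  rw [pvCell, pvVal_eq ms fs M N i j hi hj, PySem.List.pyGetD_natCast]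
  exact pvDP_write ms fs M N i j hi

-- a fully processed row i is the same table as 'row i+1 not yet started'
theorem pvDP_row_succ (ms fs : List Int) (M N i : Nat) :
    pvDP ms fs M N i M = pvDP ms fs M N (i+1) 0 := by
  apply List.ext_getElem
  · simp [pvDP]
  · intro k hk1 hk2
    simp only [pvDP, List.getElem_map, List.getElem_range]
    apply List.ext_getElem
    · simp
    · intro c hc1 hc2
      simp only [List.length_map, List.length_range] at hc1
      simp only [List.getElem_map, List.getElem_range]
      by_cases hk : k ≤ i
      · rw [if_pos (by omega), if_pos (by omega)]
      · by_cases hkc : k = i + 1 ∧ c = 0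
        · obtain ⟨hk', hc'⟩ := hkc
          subst hk'
          subst hc'
          rw [if_neg (by omega), if_pos (by omega), pvMemo_zero_right]
        · rw [if_neg (by omega), if_neg (by omega)]

-- the initial all-zero table
theorem pvDP_zero (ms fs : List Int) (M N : Nat) :
    (List.range (N+1)).map (fun _ => (List.range (M+1)).map (fun _ => (0:Int))) =
      pvDP ms fs M N 0 M := by
  apply List.ext_getElem
  · simp [pvDP]
  · intro k hk1 hk2
    simp only [pvDP, List.getElem_map, List.getElem_range]
    apply List.ext_getElem
    · simp
    · intro c hc1 hc2
      simp only [List.length_map, List.length_range] at hc1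
      simp only [List.getElem_map, List.getElem_range]
      by_cases hk : k = 0
      · subst hk
        rw [if_pos (by omega), pvMemo_zero_left]
      · rw [if_neg (by omega)]

-- A's inner loop fills row i+1 left to right
theorem pvInner (ms fs : List Int) (M N i : Nat) (hi : i < N) :
    ∀ j, j ≤ M →
      ((List.range j).map (fun k => (1:Int) + ↑k)).foldl
          (fun dp jj => pvCell ms fs dp ((i+1 : Nat) : Int) jj) (pvDP ms fs M N (i+1) 0) =
        pvDP ms fs M N (i+1) j := by
  intro j
  induction j with
  | zero => intro _; simp
  | succ j ih =>
    intro hj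
    rw [List.range_succ, List.map_append, List.foldl_append, ih (by omega)]
    have e : (1:Int) + ↑j = ((j+1 : Nat) : Int) := by push_cast; ring
    simp only [List.map_cons, List.map_nil, List.foldl_cons, List.foldl_nil, e]
    exact pvCell_step ms fs M N i j hi (by omega)

-- one iteration of A's outer loop
theorem pvRow_step (ms fs : List Int) (M N i : Nat) (hi : i < N) :
    pvRow ms fs (↑M) (pvDP ms fs M N i M) ((1:Int) + ↑i) = pvDP ms fs M N (i+1) M := by
  rw [pvRow]
  have hr : PySem.List.pyRange 1 ((M:Int)+1) 1 = (List.range M).map (fun k => (1:Int) + ↑k) := by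
    rw [PySem.List.pyRange_one]
    norm_num
  have e : (1:Int) + ↑i = ((i+1 : Nat) : Int) := by push_cast; ring
  rw [hr, e, pvDP_row_succ]
  exact pvInner ms fs M N i hi M le_rfl

-- A's outer loop fills the first i rows
theorem pvOuter (ms fs : List Int) (M N : Nat) :
    ∀ i, i ≤ N →
      ((List.range i).map (fun k => (1:Int) + ↑k)).foldl (pvRow ms fs ↑M) (pvDP ms fs M N 0 M) =
        pvDP ms fs M N i M := by
  intro i
  induction i with
  | zero => intro _; simp
  | succ i ih =>
    intro hi
    rw [List.range_succ, List.map_append, List.foldl_append, ih (by omega)]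
    simp only [List.map_cons, List.map_nil, List.foldl_cons, List.foldl_nil]
    exact pvRow_step ms fs M N i (by omega)

-- reading the answer cell of A's finished table
theorem pvFinal (ms fs : List Int) (M N : Nat) :
    PySem.List.pyGetD (PySem.List.pyGetD (pvDP ms fs M N N M) (↑N) []) (↑M) 0 =
      pvMemo ms fs N M := by
  simp only [PySem.List.pyGetD_natCast]
  rw [pvDP_getD ms fs M N N M N (by omega), pvRowEntry_getD ms fs M N M N M (by omega)]
  simp

-- A computes the recurrence
theorem pvA_eq (male female : List Int) (N M : Nat) :
    solution ↑N ↑M male female =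
      pvMemo (PySem.List.sorted male (fun x => x) false) (PySem.List.sorted female (fun x => x) false) N M := by
  unfold solution
  have hr0 : ∀ b : Nat, PySem.List.pyRange 0 ((b:Int)+1) 1 = (List.range (b+1)).map (fun k => (0:Int) + ↑k) := by
    intro b
    rw [PySem.List.pyRange_one]
    norm_num
  have hr1 : PySem.List.pyRange 1 ((N:Int)+1) 1 = (List.range N).map (fun k => (1:Int) + ↑k) := by
    rw [PySem.List.pyRange_one]
    norm_num
  simp only [hr0, hr1, List.map_map]
  simp only [Function.comp_def]
  rw [pvDP_zero (PySem.List.sorted male (fun x => x) false) (PySem.List.sorted female (fun x => x) false) M N]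
  rw [pvOuter (PySem.List.sorted male (fun x => x) false) (PySem.List.sorted female (fun x => x) false) M N N le_rfl]
  rw [pvFinal]

-- ----- B side: the memoized recursion computes the same recurrence -----

-- memo correctness: every cached entry is the recurrence's value at its key
def pvGood (ms fs : List Int) (memo : PySem.Dict (Int × Int) Int) : Prop :=
  ∀ (a b : Nat) (v : Int),
    PySem.Dict.get? memo (((a+1 : Nat) : Int), ((b+1 : Nat) : Int)) = some v →
      v = pvMemo ms fs (a+1) (b+1)

theorem pvGood_empty (ms fs : List Int) : pvGood ms fs PySem.Dict.empty := by
  intro a b v h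
  rw [PySem.Dict.get?_empty] at h
  exact absurd h (by simp)

theorem pvGood_insert (ms fs : List Int) (d : PySem.Dict (Int × Int) Int) (i j : Nat) (v : Int)
    (hd : pvGood ms fs d) (hv : v = pvMemo ms fs (i+1) (j+1)) :
    pvGood ms fs (PySem.Dict.insert d (((i+1 : Nat) : Int), ((j+1 : Nat) : Int)) v) := by
  intro a b w hw
  rw [PySem.Dict.get?_insert] at hw
  by_cases hk : (((a+1 : Nat) : Int), ((b+1 : Nat) : Int)) = (((i+1 : Nat) : Int), ((j+1 : Nat) : Int))
  · rw [if_pos hk] at hw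
    obtain ⟨ha, hb⟩ := Prod.mk.injEq .. ▸ hk
    have ha' : a = i := by omega
    have hb' : b = j := by omega
    subst ha'; subst hb'
    cases hw
    exact hv
  · rw [if_neg hk] at hw
    exact hd a b w hw

theorem pvF_go (ms fs : List Int) :
    ∀ (k i j : Nat) (memo : PySem.Dict (Int × Int) Int), i + j ≤ k → pvGood ms fs memo →
      (pvF ms fs i j memo).1 = pvMemo ms fs i j ∧ pvGood ms fs (pvF ms fs i j memo).2 := by
  intro k
  induction k with
  | zero =>
    intro i j memo hk hg
    match i, j with
    | 0, j => exact ⟨by simp [pvF, pvMemo_zero_left], by simpa [pvF] using hg⟩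
    | i+1, 0 => exact ⟨by simp [pvF, pvMemo_zero_right], by simpa [pvF] using hg⟩
    | i+1, j+1 => omega
  | succ k IH =>
    intro i j memo hk hg
    match i, j with
    | 0, j => exact ⟨by simp [pvF, pvMemo_zero_left], by simpa [pvF] using hg⟩
    | i+1, 0 => exact ⟨by simp [pvF, pvMemo_zero_right], by simpa [pvF] using hg⟩
    | i+1, j+1 =>
      rw [pvF]
      cases hmem : PySem.Dict.get? memo (((i+1 : Nat) : Int), ((j+1 : Nat) : Int)) with
      | some v => exact ⟨hg i j v hmem, hg⟩
      | none =>
        have h1 := IH i j memo (by omega) hg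
        simp only [PySem.List.pyGetD_natCast]
        rcases Nat.lt_trichotomy i j with hij | hij | hij
        · have h2 := IH (i+1) j (pvF ms fs i j memo).2 (by omega) h1.2
          simp only [if_pos (show i + 1 < j + 1 by omega),
                     if_neg (show ¬ i + 1 > j + 1 by omega)]
          have hval : min ((pvF ms fs i j memo).1 + |ms.getD i 0 - fs.getD j 0|)
              (pvF ms fs (i+1) j (pvF ms fs i j memo).2).1 = pvMemo ms fs (i+1) (j+1) := by
            rw [h1.1, h2.1]
            simp [pvMemo, (show i + 1 < j + 1 by omega), (show ¬ i + 1 > j + 1 by omega)]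
          exact ⟨hval, pvGood_insert ms fs _ i j _ h2.2 hval⟩
        · subst hij
          simp only [if_neg (show ¬ i + 1 < i + 1 by omega)]
          have hval : (pvF ms fs i i memo).1 + |ms.getD i 0 - fs.getD i 0| =
              pvMemo ms fs (i+1) (i+1) := by
            rw [h1.1]
            simp [pvMemo]
          exact ⟨hval, pvGood_insert ms fs _ i i _ h1.2 hval⟩
        · have h2 := IH i (j+1) (pvF ms fs i j memo).2 (by omega) h1.2
          simp only [if_neg (show ¬ i + 1 < j + 1 by omega),
                     if_pos (show i + 1 > j + 1 by omega)]
          have hval : min ((pvF ms fs i j memo).1 + |ms.getD i 0 - fs.getD j 0|)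
              (pvF ms fs i (j+1) (pvF ms fs i j memo).2).1 = pvMemo ms fs (i+1) (j+1) := by
            rw [h1.1, h2.1]
            simp [pvMemo, (show ¬ i + 1 < j + 1 by omega), (show i + 1 > j + 1 by omega)]
          exact ⟨hval, pvGood_insert ms fs _ i j _ h2.2 hval⟩

-- B computes the recurrence
theorem pvB_eq (male female : List Int) (N M : Nat) :
    solution_alt ↑N ↑M male female =
      pvMemo (PySem.List.sorted male (fun x => x) false) (PySem.List.sorted female (fun x => x) false) N M := by
  unfold solution_alt
  have h := pvF_go (PySem.List.sorted male (fun x => x) false)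
    (PySem.List.sorted female (fun x => x) false) (N + M) N M PySem.Dict.empty le_rfl
    (pvGood_empty _ _)
  simpa using h.1

-- ===== VERDICT (by name: the statement is the Claim_ definition above) =====
theorem solution_spec : Claim_equal_solution := by
  unfold Claim_equal_solution
  intro n m male female _ hpre
  obtain ⟨hn, hm, -⟩ := hpre
  obtain ⟨N, rfl⟩ : ∃ N : Nat, n = ↑N := ⟨n.toNat, (Int.toNat_of_nonneg hn).symm⟩
  obtain ⟨M, rfl⟩ : ∃ M : Nat, m = ↑M := ⟨m.toNat, (Int.toNat_of_nonneg hm).symm⟩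
  unfold Spec_solution
  rw [pvA_eq, pvB_eq]
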